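-- pv_equiv track=rewrite | github.com/JlMoreno00/cooking-planner-agent | scripts/shopping_notes_sync.py | render_note
-- ===== SOURCE A (Python) =====
-- def categorize(item: str) -> str:
--     x = item.lower()
--     if any(k in x for k in ["tomate", "cebolla", "pimiento", "lechuga", "zanahoria", "patata"]):
--         return "Frutas y Verduras"
--     if any(k in x for k in ["pollo", "ternera", "pescado", "atún", "huevo"]):
--         return "Carnes y Pescados"
--     if any(k in x for k in ["arroz", "pasta", "pan", "avena"]):
--         return "Cereales y Pastas"
--     return "Otros"
--
-- def render_note(items: list[str], title: str) -> str:
--     groups: dict[str, list[str]] = {}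
--     for i in items:
--         groups.setdefault(categorize(i), []).append(i)
--
--     lines = [f"🛒 {title}", ""]
--     for cat in ["Frutas y Verduras", "Carnes y Pescados", "Cereales y Pastas", "Otros"]:
--         vals = groups.get(cat, [])
--         if not vals:
--             continue
--         lines.append(f"{cat}:")
--         for v in vals:
--             lines.append(f"□ {v}")
--         lines.append("")
--     return "\n".join(lines).strip() + "\n"
-- ===== SOURCE B (Python) =====
-- def categorize(item: str) -> str:
--     x = item.lower()
--     if any(k in x for k in ["tomate", "cebolla", "pimiento", "lechuga", "zanahoria", "patata"]):
--         return "Frutas y Verduras"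
--     if any(k in x for k in ["pollo", "ternera", "pescado", "atún", "huevo"]):
--         return "Carnes y Pescados"
--     if any(k in x for k in ["arroz", "pasta", "pan", "avena"]):
--         return "Cereales y Pastas"
--     return "Otros"
--
-- def render_note(items: list[str], title: str) -> str:
--     sections = []
--     for cat in ["Frutas y Verduras", "Carnes y Pescados", "Cereales y Pastas", "Otros"]:
--         vals = [i for i in items if categorize(i) == cat]
--         if vals:
--             sections.append(cat + ":\n" + "\n".join("□ " + v for v in vals))
--     return ("🛒 " + title + "\n\n" + "\n\n".join(sections)).strip() + "\n"
-- ===== Notes on version B (the rewrite author's own statement) =====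
-- stated objective: simpler
-- what changed: B drops A's grouping dictionary and mutated line list: it filters the items once per fixed category, builds each section as one whole string, and joins the sections with blank lines.
import Mathlib
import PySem

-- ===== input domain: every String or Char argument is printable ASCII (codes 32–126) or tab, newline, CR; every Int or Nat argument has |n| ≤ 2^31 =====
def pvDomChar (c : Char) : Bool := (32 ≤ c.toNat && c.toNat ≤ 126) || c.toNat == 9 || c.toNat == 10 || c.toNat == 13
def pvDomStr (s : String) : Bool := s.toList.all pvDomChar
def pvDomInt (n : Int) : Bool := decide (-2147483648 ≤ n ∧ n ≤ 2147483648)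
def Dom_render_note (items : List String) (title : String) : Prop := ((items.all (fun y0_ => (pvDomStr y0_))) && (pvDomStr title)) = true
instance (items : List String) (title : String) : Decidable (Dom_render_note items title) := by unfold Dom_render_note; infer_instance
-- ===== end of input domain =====

-- B replaces A's grouping dictionary by one per-category filter pass and assembles the
-- note from whole section strings instead of a mutated line list (objective: simpler).

-- ===== PORT A =====
-- shared module helper `categorize` (identical in Source A and Source B)
def categorize (item : String) : String :=
  let x := PySem.Str.lower item
  if (["tomate", "cebolla", "pimiento", "lechuga", "zanahoria", "patata"].any
        (fun k => PySem.Str.isIn k x)) then "Frutas y Verduras"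
  else if (["pollo", "ternera", "pescado", "atún", "huevo"].any
        (fun k => PySem.Str.isIn k x)) then "Carnes y Pescados"
  else if (["arroz", "pasta", "pan", "avena"].any
        (fun k => PySem.Str.isIn k x)) then "Cereales y Pastas"
  else "Otros"

def render_note (items : List String) (title : String) : String :=
  -- groups.setdefault(categorize(i), []).append(i)  ≡  d[k] = d.get(k, []) + [i] in place,
  -- which is exactly Dict.modify (key position and insertion order preserved)
  let groups : PySem.Dict String (List String) :=
    items.foldl (fun d i => d.modify (categorize i) [] (fun xs => xs ++ [i])) PySem.Dict.empty
  let lines0 : List String := ["🛒 " ++ title, ""]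
  let lines := ["Frutas y Verduras", "Carnes y Pescados", "Cereales y Pastas", "Otros"].foldl
    (fun lines cat =>
      let vals := groups.getD cat []
      if vals = [] then lines
      else (vals.foldl (fun ls v => ls ++ ["□ " ++ v]) (lines ++ [cat ++ ":"])) ++ [""])
    lines0
  PySem.Str.strip (PySem.Str.join "\n" lines) ++ "\n"

-- ===== PORT B =====
def render_note_alt (items : List String) (title : String) : String :=
  let sections : List String :=
    ["Frutas y Verduras", "Carnes y Pescados", "Cereales y Pastas", "Otros"].filterMap
      (fun cat =>
        let vals := items.filter (fun i => categorize i == cat)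
        if vals = [] then none
        else some (cat ++ ":\n" ++ PySem.Str.join "\n" (vals.map (fun v => "□ " ++ v))))
  PySem.Str.strip ("🛒 " ++ title ++ "\n\n" ++ PySem.Str.join "\n\n" sections) ++ "\n"

-- ===== PRECONDITION & SPEC =====
def Spec_render_note (items : List String) (title : String) (out : String) : Prop := out = render_note_alt items title
instance (items : List String) (title : String) (out : String) : Decidable (Spec_render_note items title out) := by unfold Spec_render_note; infer_instance

-- ===== CLAIM (what is proved, stated in full; the proofs are below) =====
def Claim_equal_render_note : Prop := ∀ (items : List String) (title : String), Dom_render_note items title → Spec_render_note items title (render_note items title)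

-- ===== LEMMAS AND PROOFS =====

-- proof-only abbreviations: per-category item filter, A's section lines, B's section string
def pvF (items : List String) (cat : String) : List String :=
  items.filter (fun i => categorize i == cat)

def pvSecL (items : List String) (cat : String) : List String :=
  (cat ++ ":") :: ((pvF items cat).map (fun v => "□ " ++ v) ++ [""])

def pvFlat (items : List String) (cat : String) : List String :=
  if pvF items cat = [] then [] else pvSecL items cat

def pvG (items : List String) (cat : String) : Option String :=
  if pvF items cat = [] then none
  else some (cat ++ ":\n" ++ PySem.Str.join "\n" ((pvF items cat).map (fun v => "□ " ++ v)))

theorem join_cons_ne (sep a : String) (l : List String) (h : l ≠ []) :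
    PySem.Str.join sep (a :: l) = a ++ sep ++ PySem.Str.join sep l := by
  cases l with
  | nil => simp at h
  | cons b t =>
      simp [PySem.Str.join, PySem.Chars.join, List.intercalate, String.append_assoc]

theorem join_singleton (sep a : String) : PySem.Str.join sep [a] = a := by
  simp [PySem.Str.join, PySem.Chars.join, List.intercalate]

theorem join_append_ne (sep : String) (l1 l2 : List String) (h1 : l1 ≠ []) (h2 : l2 ≠ []) :
    PySem.Str.join sep (l1 ++ l2) = PySem.Str.join sep l1 ++ sep ++ PySem.Str.join sep l2 := by
  induction l1 with
  | nil => simp at h1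
  | cons a t ih =>
      cases t with
      | nil => simp [join_singleton, join_cons_ne sep a l2 h2]
      | cons b u =>
          rw [List.cons_append, join_cons_ne sep a ((b :: u) ++ l2) (by simp),
              ih (by simp), join_cons_ne sep a (b :: u) (by simp)]
          simp [String.append_assoc]

theorem rstrip_newline (x : List Char) :
    PySem.Chars.rstrip (x ++ ['\n']) = PySem.Chars.rstrip x := by
  simp [PySem.Chars.rstrip, PySem.Chars.isspace]

theorem strip_newline (s : String) :
    PySem.Str.strip (s ++ "\n") = PySem.Str.strip s := by
  apply String.toList_inj.mp
  simp only [PySem.Str.strip, PySem.Chars.strip, String.toList_ofList, String.toList_append]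
  have hnl : ("\n" : String).toList = ['\n'] := rfl
  rw [hnl, PySem.Chars.lstrip]
  rw [List.dropWhile_append]
  split
  · next hdrop =>
      have : List.dropWhile PySem.Chars.isspace s.toList = [] := by
        simpa using hdrop
      simp [this, PySem.Chars.lstrip, PySem.Chars.rstrip, PySem.Chars.isspace]
  · next hdrop =>
      have : ¬ (List.dropWhile PySem.Chars.isspace s.toList = []) := by
        simpa using hdrop
      rw [rstrip_newline]
      simp [PySem.Chars.lstrip]

-- A's grouping dictionary, read back per category, is exactly B's per-category filter
theorem getD_group (items : List String) (cat : String) :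
    (items.foldl (fun d i => d.modify (categorize i) [] (fun xs => xs ++ [i]))
        PySem.Dict.empty).getD cat []
      = items.filter (fun i => categorize i == cat) := by
  have h := PySem.Dict.getD_foldl_modify_append
    (items.map (fun i => (categorize i, i))) PySem.Dict.empty cat
  rw [List.foldl_map] at h
  rw [h]
  simp [List.filter_map, Function.comp_def]

-- A's category loop appends, for each inhabited category, its header/check-lines/blank block
theorem loopA (items : List String) (cats : List String) (lines : List String) :
    cats.foldl
      (fun lines cat =>
        if pvF items cat = [] then lines
        else ((pvF items cat).foldl (fun ls v => ls ++ ["□ " ++ v]) (lines ++ [cat ++ ":"])) ++ [""])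
      lines
    = lines ++ cats.flatMap (pvFlat items) := by
  induction cats generalizing lines with
  | nil => simp
  | cons c t ih =>
      rw [List.foldl_cons]
      by_cases h : pvF items c = []
      · rw [if_pos h, ih]
        simp [pvFlat, h]
      · rw [if_neg h, ih, PySem.List.foldl_append_singleton_eq_map]
        simp [pvFlat, h, pvSecL, List.append_assoc]

theorem flat_nil_iff (items : List String) (cats : List String) :
    cats.flatMap (pvFlat items) = [] ↔ cats.filterMap (pvG items) = [] := by
  induction cats with
  | nil => simp
  | cons c t ih =>
      by_cases h : pvF items c = [] <;>
        simp [pvFlat, pvG, h, pvSecL, ih]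

-- one inhabited section's lines, joined: the section string plus a trailing newline
theorem sec_join (items : List String) (c : String) (h : pvF items c ≠ []) :
    PySem.Str.join "\n" (pvSecL items c)
      = (c ++ ":\n" ++ PySem.Str.join "\n" ((pvF items c).map (fun v => "□ " ++ v))) ++ "\n" := by
  have hm : (pvF items c).map (fun v => "□ " ++ v) ≠ [] := by simp [h]
  rw [pvSecL, join_cons_ne _ _ _ (by simp [hm]),
      join_append_ne _ _ _ hm (by simp), join_singleton]
  simp only [show (":\n" : String) = ":" ++ "\n" from rfl, String.append_assoc,
    String.append_empty]

-- the flattened section blocks, joined by newlines, against B's sections joined by blank lines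
theorem joinJ (items : List String) (cats : List String) :
    PySem.Str.join "\n" (cats.flatMap (pvFlat items))
      = if cats.filterMap (pvG items) = [] then ""
        else PySem.Str.join "\n\n" (cats.filterMap (pvG items)) ++ "\n" := by
  induction cats with
  | nil => simp [PySem.Str.join, PySem.Chars.join, List.intercalate]
  | cons c t ih =>
      by_cases h : pvF items c = []
      · have h1 : pvFlat items c = [] := by simp [pvFlat, h]
        have h2 : pvG items c = none := by simp [pvG, h]
        simp only [List.flatMap_cons, List.filterMap_cons, h1, h2, List.nil_append]
        exact ih
      · have h1 : pvFlat items c = pvSecL items c := by simp [pvFlat, h]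
        have h2 : pvG items c
            = some (c ++ ":\n" ++ PySem.Str.join "\n" ((pvF items c).map (fun v => "□ " ++ v))) := by
          simp [pvG, h]
        simp only [List.flatMap_cons, List.filterMap_cons, h1, h2]
        rw [if_neg (by simp)]
        by_cases ht : t.filterMap (pvG items) = []
        · have hft : t.flatMap (pvFlat items) = [] := (flat_nil_iff items t).mpr ht
          rw [hft, List.append_nil, sec_join items c h, ht, join_singleton]
        · have hft : t.flatMap (pvFlat items) ≠ [] := by
            intro hc; exact ht ((flat_nil_iff items t).mp hc)
          rw [join_append_ne _ _ _ (by simp [pvSecL]) hft, ih, if_neg ht,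
              sec_join items c h, join_cons_ne _ _ _ ht]
          simp only [show ("\n\n" : String) = "\n" ++ "\n" from rfl, String.append_assoc]

-- ===== VERDICT (by name: the statement is the Claim_ definition above) =====
theorem render_note_spec : Claim_equal_render_note := by
  intro items title _
  show render_note items title = render_note_alt items title
  unfold render_note render_note_alt
  simp only [getD_group]
  rw [show ∀ lines0, (["Frutas y Verduras", "Carnes y Pescados", "Cereales y Pastas", "Otros"].foldl
      (fun lines cat =>
        if items.filter (fun i => categorize i == cat) = [] then lines
        else ((items.filter (fun i => categorize i == cat)).foldl
                (fun ls v => ls ++ ["□ " ++ v]) (lines ++ [cat ++ ":"])) ++ [""])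
      lines0)
      = lines0 ++ ["Frutas y Verduras", "Carnes y Pescados", "Cereales y Pastas", "Otros"].flatMap
          (pvFlat items) from fun lines0 => loopA items _ lines0]
  have hsec : (["Frutas y Verduras", "Carnes y Pescados", "Cereales y Pastas", "Otros"].filterMap
      (fun cat =>
        if items.filter (fun i => categorize i == cat) = [] then none
        else some (cat ++ ":\n" ++ PySem.Str.join "\n"
          ((items.filter (fun i => categorize i == cat)).map (fun v => "□ " ++ v)))))
      = ["Frutas y Verduras", "Carnes y Pescados", "Cereales y Pastas", "Otros"].filterMap
          (pvG items) := by
    simp [pvG, pvF]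
  rw [hsec]
  set cats : List String :=
    ["Frutas y Verduras", "Carnes y Pescados", "Cereales y Pastas", "Otros"] with hcats
  by_cases hs : cats.filterMap (pvG items) = []
  · have hf : cats.flatMap (pvFlat items) = [] := (flat_nil_iff items cats).mpr hs
    rw [hs, hf, List.append_nil, join_cons_ne _ _ _ (by simp), join_singleton,
        show PySem.Str.join "\n\n" ([] : List String) = "" from rfl,
        String.append_empty, String.append_empty]
    have e : ("🛒 " ++ title ++ "\n\n") = ("🛒 " ++ title ++ "\n") ++ "\n" := by
      rw [show ("\n\n" : String) = "\n" ++ "\n" from rfl]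
      simp [String.append_assoc]
    rw [e]
    simp [strip_newline]
  · have hf : cats.flatMap (pvFlat items) ≠ [] := by
      intro hc; exact hs ((flat_nil_iff items cats).mp hc)
    rw [join_append_ne _ _ _ (by simp) hf, joinJ, if_neg hs,
        join_cons_ne _ _ _ (by simp), join_singleton, String.append_empty]
    have e : ("🛒 " ++ title ++ "\n" ++ "\n"
          ++ (PySem.Str.join "\n\n" (cats.filterMap (pvG items)) ++ "\n"))
        = ("🛒 " ++ title ++ "\n\n" ++ PySem.Str.join "\n\n" (cats.filterMap (pvG items))) ++ "\n" := by
      rw [show ("\n\n" : String) = "\n" ++ "\n" from rfl]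
      simp [String.append_assoc]
    rw [e]
    simp [strip_newline]
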